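-- pv_equiv track=rewrite | github.com/pulp-platform/spatz | sw/spatzBenchmarks/spmm_sparse/script/gen_data.py | power_of_two_choices
-- ===== SOURCE A (Python) =====
-- def power_of_two_choices(min_count, max_count):
--     counts = []
--     value = 1
--     while value <= max_count:
--         if value >= min_count:
--             counts.append(value)
--         value <<= 1
--     return counts
-- ===== SOURCE B (Python) =====
-- def power_of_two_choices(min_count, max_count):
--     # closed form: enumerate the exponent range instead of scanning powers
--     lo = 0 if min_count <= 1 else (min_count - 1).bit_length()
--     hi = max_count.bit_length() - 1 if max_count >= 1 else -1
--     return [1 << e for e in range(lo, hi + 1)]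
-- ===== Notes on version B (the rewrite author's own statement) =====
-- stated objective: alternative
-- what changed: Replaces the doubling while-loop with a membership test by computing the inclusive exponent bounds in closed form via bit_length and enumerating [1 << e for e in range(lo, hi+1)].
import Mathlib
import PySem

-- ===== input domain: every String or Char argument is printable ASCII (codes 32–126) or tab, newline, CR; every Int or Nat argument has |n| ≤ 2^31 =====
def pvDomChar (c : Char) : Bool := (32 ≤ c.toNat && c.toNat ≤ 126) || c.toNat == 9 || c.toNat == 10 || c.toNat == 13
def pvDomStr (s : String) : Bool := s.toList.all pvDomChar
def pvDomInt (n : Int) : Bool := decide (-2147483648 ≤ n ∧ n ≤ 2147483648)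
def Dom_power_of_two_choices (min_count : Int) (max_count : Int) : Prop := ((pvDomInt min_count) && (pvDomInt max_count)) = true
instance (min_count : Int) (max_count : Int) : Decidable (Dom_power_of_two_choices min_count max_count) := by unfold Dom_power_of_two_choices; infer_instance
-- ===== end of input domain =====

-- B replaces A's doubling scan with closed-form exponent bounds (bit_length) and enumerates them; same cost, plainer shape.

-- ===== PORT A =====
-- while value <= max_count: if value >= min_count: append; value <<= 1
-- ('value <<= 1' is doubling, ported exactly as value * 2; the '1 ≤ value' conjunct of the
--  guard is a totality guard only: the loop variable starts at 1 and doubles, so it is always ≥ 1)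
def potLoopA (min_count max_count value : Int) (acc : List Int) : List Int :=
  if 1 ≤ value ∧ value ≤ max_count then
    potLoopA min_count max_count (value * 2) (if min_count ≤ value then acc ++ [value] else acc)
  else acc
termination_by (max_count + 1 - value).toNat
decreasing_by omega

def power_of_two_choices (min_count : Int) (max_count : Int) : List Int :=
  potLoopA min_count max_count 1 []

-- ===== PORT B =====
-- lo = 0 if min_count <= 1 else (min_count-1).bit_length(); hi = max_count.bit_length()-1 if max_count >= 1 else -1
-- return [1 << e for e in range(lo, hi+1)]   ('1 << e' = 2^e; every e in the range is ≥ 0, so .toNat is exact)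
def power_of_two_choices_alt (min_count : Int) (max_count : Int) : List Int :=
  (PySem.List.pyRange
      (if min_count ≤ 1 then 0 else (PySem.Int.bitLength (min_count - 1) : Int))     -- lo
      ((if 1 ≤ max_count then (PySem.Int.bitLength max_count : Int) - 1 else -1) + 1)     -- hi + 1
      1).map (fun e => (2 : Int) ^ e.toNat)

-- ===== PRECONDITION & SPEC =====
def Spec_power_of_two_choices (min_count : Int) (max_count : Int) (out : List Int) : Prop := out = power_of_two_choices_alt min_count max_count
instance (min_count : Int) (max_count : Int) (out : List Int) : Decidable (Spec_power_of_two_choices min_count max_count out) := by unfold Spec_power_of_two_choices; infer_instance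

-- ===== CLAIM (what is proved, stated in full; the proofs are below) =====
def Claim_equal_power_of_two_choices : Prop := ∀ (min_count : Int) (max_count : Int), Dom_power_of_two_choices min_count max_count → Spec_power_of_two_choices min_count max_count (power_of_two_choices min_count max_count)

-- ===== LEMMAS AND PROOFS =====

-- lower exponent bound: loN mn is the least e with mn ≤ 2^e
def loN (mn : Int) : Nat := if mn ≤ 1 then 0 else PySem.Int.bitLength (mn - 1)
-- upper bound: hiS mx is the number of admissible exponents, i.e. e is kept iff e < hiS mx
def hiS (mx : Int) : Nat := if 1 ≤ mx then PySem.Int.bitLength mx else 0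

lemma pow_le_iff (mx : Int) (e : Nat) : (2 : Int) ^ e ≤ mx ↔ e < hiS mx := by
  unfold hiS
  split_ifs with hm
  · set b := PySem.Int.bitLength mx with hb
    have h1 : mx.natAbs < 2 ^ b := PySem.Int.lt_two_pow_bitLength mx
    have h2 : 2 ^ (b - 1) ≤ mx.natAbs := PySem.Int.two_pow_bitLength_le mx (by omega)
    have hb1 : 1 ≤ b := by
      by_contra h
      have : b = 0 := by omega
      rw [this] at h1; simp at h1; omega
    have hcast : mx = (mx.natAbs : Int) := by omega
    rw [hcast]
    rw [show ((2:Int)^e) = ((2^e : Nat) : Int) by push_cast; ring]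
    rw [Nat.cast_le]
    constructor
    · intro h
      have : 2 ^ e < 2 ^ b := lt_of_le_of_lt h h1
      exact (Nat.pow_lt_pow_iff_right (by norm_num)).1 this
    · intro h
      calc 2 ^ e ≤ 2 ^ (b - 1) := Nat.pow_le_pow_right (by norm_num) (by omega)
        _ ≤ mx.natAbs := h2
  · constructor
    · intro h
      have : (1:Int) ≤ 2 ^ e := one_le_pow₀ one_le_two
      omega
    · omega

lemma min_le_pow_iff (mn : Int) (e : Nat) : mn ≤ (2 : Int) ^ e ↔ loN mn ≤ e := by
  unfold loN
  split_ifs with hm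
  · have : (1:Int) ≤ 2 ^ e := one_le_pow₀ one_le_two
    constructor
    · intro _; omega
    · intro _; omega
  · set L := PySem.Int.bitLength (mn - 1) with hL
    have h1 : (mn - 1).natAbs < 2 ^ L := PySem.Int.lt_two_pow_bitLength (mn - 1)
    have h2 : 2 ^ (L - 1) ≤ (mn - 1).natAbs := PySem.Int.two_pow_bitLength_le (mn - 1) (by omega)
    have hL1 : 1 ≤ L := by
      by_contra h
      have : L = 0 := by omega
      rw [this] at h1; simp at h1; omega
    have hcast : mn - 1 = ((mn - 1).natAbs : Int) := by omega
    have hiff : mn ≤ (2:Int) ^ e ↔ (mn - 1).natAbs < 2 ^ e := by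
      rw [show ((2:Int)^e) = ((2^e : Nat) : Int) by push_cast; ring]
      omega
    rw [hiff]
    constructor
    · intro h
      have : 2 ^ (L - 1) < 2 ^ e := lt_of_le_of_lt h2 h
      have := (Nat.pow_lt_pow_iff_right (a := 2) (by norm_num)).1 this
      omega
    · intro h
      calc (mn - 1).natAbs < 2 ^ L := h1
        _ ≤ 2 ^ e := Nat.pow_le_pow_right (by norm_num) h

def expList (lo hs k : Nat) : List Int :=
  (List.range' (max k lo) (hs - max k lo)).map (fun e => (2 : Int) ^ e)

lemma expList_stop (lo hs k : Nat) (h : hs ≤ k) : expList lo hs k = [] := by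
  unfold expList
  rw [Nat.sub_eq_zero_of_le (le_trans h (Nat.le_max_left k lo))]
  simp

lemma expList_cons (lo hs k : Nat) (hl : lo ≤ k) (hk : k < hs) :
    expList lo hs k = (2 : Int) ^ k :: expList lo hs (k + 1) := by
  unfold expList
  rw [max_eq_left hl, max_eq_left (show lo ≤ k + 1 by omega)]
  rw [show hs - k = (hs - (k + 1)) + 1 by omega]
  rw [List.range'_succ]
  simp

lemma expList_skip (lo hs k : Nat) (hl : k < lo) :
    expList lo hs k = expList lo hs (k + 1) := by
  unfold expList
  rw [max_eq_right (show k ≤ lo by omega), max_eq_right (show k + 1 ≤ lo by omega)]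

lemma loop_eq (mn mx : Int) : ∀ (d k : Nat) (acc : List Int), hiS mx ≤ k + d →
    potLoopA mn mx ((2 : Int) ^ k) acc = acc ++ expList (loN mn) (hiS mx) k := by
  intro d
  induction d with
  | zero =>
    intro k acc h
    rw [potLoopA, if_neg, expList_stop _ _ _ (by omega)]
    · simp
    · rintro ⟨-, h2⟩
      have := (pow_le_iff mx k).1 h2
      omega
  | succ d ih =>
    intro k acc h
    by_cases hk : k < hiS mx
    · rw [potLoopA, if_pos ⟨one_le_pow₀ one_le_two, (pow_le_iff mx k).2 hk⟩]
      rw [show (2:Int) ^ k * 2 = 2 ^ (k + 1) from (pow_succ 2 k).symm]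
      rw [ih (k + 1) _ (by omega)]
      by_cases hl : loN mn ≤ k
      · rw [if_pos ((min_le_pow_iff mn k).2 hl)]
        rw [expList_cons _ _ _ hl hk]
        simp
      · rw [if_neg (fun hc => hl ((min_le_pow_iff mn k).1 hc))]
        rw [expList_skip (loN mn) (hiS mx) k (by omega)]
    · rw [potLoopA, if_neg, expList_stop _ _ _ (by omega)]
      · simp
      · rintro ⟨-, h2⟩
        exact hk ((pow_le_iff mx k).1 h2)

lemma alt_eq (mn mx : Int) :
    power_of_two_choices_alt mn mx = expList (loN mn) (hiS mx) 0 := by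
  unfold power_of_two_choices_alt
  have hlo : (if mn ≤ 1 then (0:Int) else (PySem.Int.bitLength (mn - 1) : Int)) = (loN mn : Int) := by
    unfold loN; split_ifs <;> simp
  have hhi : (if 1 ≤ mx then (PySem.Int.bitLength mx : Int) - 1 else -1) + 1 = (hiS mx : Int) := by
    unfold hiS; split_ifs <;> simp
  rw [hlo, hhi, PySem.List.pyRange_one]
  unfold expList
  rw [Nat.zero_max, Int.toNat_sub, List.range'_eq_map_range]
  simp only [List.map_map]
  apply List.map_congr_left
  intro k _
  simp only [Function.comp]
  congr 1

-- ===== VERDICT (by name: the statement is the Claim_ definition above) =====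
theorem power_of_two_choices_spec : Claim_equal_power_of_two_choices := by
  intro mn mx _
  unfold Spec_power_of_two_choices power_of_two_choices
  rw [alt_eq, show (1:Int) = 2 ^ (0:Nat) by norm_num,
    loop_eq mn mx (hiS mx) 0 [] (by omega), List.nil_append]
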